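-- pv_equiv track=rewrite | github.com/ThenTech/BDA-Assignments | Plagiarism/Resources/submissions/submissions/2566344.py | decode_helper
-- ===== SOURCE A (Python) =====
-- def in_range(r, nr):
--     return 0 <= nr < r
--
-- def encode_helper(s):
--     output = ""
--
--     for i in range(len(s)):
--         nr = 0
--         if in_range(len(s), i-1) and s[i-1] == "X":
--             nr += 1
--         if in_range(len(s), i+1) and s[i+1] == "X":
--             nr += 1
--         output += str(nr)
--
--     return output
--
-- def decode_helper(s, r, output):
--     if len(r) == len(s):
--         if encode_helper(r) == s:
--             output.append(r)
--     else:
--         decode_helper(s, r + " ", output)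
--         decode_helper(s, r + "X", output)
--
--     return output
-- ===== SOURCE B (Python) =====
-- # Output-sensitive backtracking: extend the prefix one character at a time and
-- # prune as soon as a fully-determined encoded digit disagrees with s, instead
-- # of enumerating all 2^(n-len(r)) completions and encoding each one.
-- # Note: like A, mutates `output` in place (appends) and returns it.
-- def decode_helper(s, r, output):
--     n = len(s)
--     if len(r) > n:
--         return output  # no completion of r can have length n
--
--     def digit(buf, j):
--         c = 0
--         if j > 0 and buf[j - 1] == "X":
--             c += 1
--         if j + 1 < len(buf) and buf[j + 1] == "X":
--             c += 1
--         return str(c)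
--
--     buf = list(r)
--     # digits already fully determined by the given prefix must match s
--     for j in range(len(buf) - 1):
--         if s[j] != digit(buf, j):
--             return output
--
--     def dfs():
--         i = len(buf)
--         if i == n:
--             if n == 0 or s[n - 1] == digit(buf, n - 1):
--                 output.append("".join(buf))
--             return
--         for c in (" ", "X"):
--             buf.append(c)
--             if i == 0 or s[i - 1] == digit(buf, i - 1):
--                 dfs()
--             buf.pop()
--
--     dfs()
--     return output
-- ===== Notes on version B (the rewrite author's own statement) =====
-- stated objective: faster
-- what changed: A enumerates all 2^(n-len(r)) completions of r and encodes each full candidate; B does a backtracking DFS that checks each encoded digit as soon as it is fully determined and prunes dead prefixes, making the work output-sensitive.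
import Mathlib
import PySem

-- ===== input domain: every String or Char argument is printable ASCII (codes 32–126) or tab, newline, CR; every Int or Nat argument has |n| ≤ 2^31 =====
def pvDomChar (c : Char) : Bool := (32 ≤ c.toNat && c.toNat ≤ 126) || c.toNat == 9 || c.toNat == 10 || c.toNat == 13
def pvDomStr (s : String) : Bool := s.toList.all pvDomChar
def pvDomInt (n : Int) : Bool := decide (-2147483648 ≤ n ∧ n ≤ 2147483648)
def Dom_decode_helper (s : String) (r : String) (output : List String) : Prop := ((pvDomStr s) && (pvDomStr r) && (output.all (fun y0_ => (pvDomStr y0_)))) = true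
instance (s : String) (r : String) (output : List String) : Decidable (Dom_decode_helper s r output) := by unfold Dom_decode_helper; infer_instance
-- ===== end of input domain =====

-- B replaces A's exhaustive enumerate-all-2^(n-|r|)-completions-then-encode with a
-- backtracking DFS that prunes a prefix as soon as a fully determined encoded digit
-- disagrees with s (output-sensitive; measurably faster).  Like A, the Python B
-- appends to `output` in place and returns it; the theorems are about the return value.

-- ===== PORT A =====
def in_range (r nr : Int) : Bool := decide (0 ≤ nr ∧ nr < r)

-- encode_helper, on the character list of its string argument
def encode_chars (cs : List Char) : List Char :=
  (PySem.List.pyRange 0 (cs.length : Int) 1).foldl (fun output i =>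
    let nr : Int := 0
    let nr := if in_range (cs.length : Int) (i - 1) && (PySem.List.pyGetD cs (i - 1) ' ' == 'X') then nr + 1 else nr
    let nr := if in_range (cs.length : Int) (i + 1) && (PySem.List.pyGetD cs (i + 1) ' ' == 'X') then nr + 1 else nr
    output ++ PySem.Int.toChars nr) []

-- the recursion of A, with fuel: Python's decode_helper recurses, growing r by one
-- character per level; fuel len(s)+1-len(r) covers every input admitted by Pre_.
def decode_go (scs : List Char) : Nat → List Char → List String → List String
  | 0, _, output => output
  | fuel + 1, rcs, output =>
    if rcs.length = scs.length then
      if encode_chars rcs = scs then output ++ [String.ofList rcs] else output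
    else
      decode_go scs fuel (rcs ++ ['X']) (decode_go scs fuel (rcs ++ [' ']) output)

def decode_helper (s : String) (r : String) (output : List String) : List String :=
  decode_go s.toList (s.toList.length + 1 - r.toList.length) r.toList output

-- ===== PORT B =====
-- Source B's digit(buf, j): the encoded digit at j, as the 1-character string str(c)
def digitB (buf : List Char) (j : Nat) : List Char :=
  let c : Int := 0
  let c := if 0 < j ∧ buf.getD (j - 1) ' ' = 'X' then c + 1 else c
  let c := if j + 1 < buf.length ∧ buf.getD (j + 1) ' ' = 'X' then c + 1 else c
  PySem.Int.toChars c

-- Source B's dfs: rem = n - len(buf) characters still to choose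
def dfsB (scs : List Char) : Nat → List Char → List String → List String
  | 0, buf, output =>
    if scs.length = 0 ∨ [scs.getD (scs.length - 1) ' '] = digitB buf (buf.length - 1) then
      output ++ [String.ofList buf]
    else output
  | rem + 1, buf, output =>
    let i := buf.length
    let output :=
      if i = 0 ∨ [scs.getD (i - 1) ' '] = digitB (buf ++ [' ']) (i - 1) then
        dfsB scs rem (buf ++ [' ']) output
      else output
    if i = 0 ∨ [scs.getD (i - 1) ' '] = digitB (buf ++ ['X']) (i - 1) then
      dfsB scs rem (buf ++ ['X']) output
    else output

def decode_helper_alt (s : String) (r : String) (output : List String) : List String :=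
  let scs := s.toList
  let buf := r.toList
  if scs.length < buf.length then output
  else if (List.range (buf.length - 1)).all (fun j => decide ([scs.getD j ' '] = digitB buf j)) then
    dfsB scs (scs.length - buf.length) buf output
  else output

-- ===== PRECONDITION & SPEC =====
-- Pre_ excludes len(r) > len(s), where A's recursion never reaches the base case
-- and Python raises RecursionError.
def Pre_decode_helper (s : String) (r : String) (output : List String) : Prop :=
  r.toList.length ≤ s.toList.length
instance (s : String) (r : String) (output : List String) : Decidable (Pre_decode_helper s r output) := by unfold Pre_decode_helper; infer_instance

def pvWitness_decode_helper : String × String × List String := ("0110", " X", ["q"])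

def Spec_decode_helper (s : String) (r : String) (output : List String) (out : List String) : Prop := out = decode_helper_alt s r output
instance (s : String) (r : String) (output : List String) (out : List String) : Decidable (Spec_decode_helper s r output out) := by unfold Spec_decode_helper; infer_instance

-- ===== CLAIM (what is proved, stated in full; the proofs are below) =====
def Claim_equal_decode_helper : Prop := ∀ (s : String) (r : String) (output : List String), Dom_decode_helper s r output → Pre_decode_helper s r output → Spec_decode_helper s r output (decode_helper s r output)


-- ===== LEMMAS AND PROOFS =====

-- the encoded digit at position j, as a character
def pvD (u : List Char) (j : Nat) : Char :=
  Char.ofNat (48 + (((if 0 < j ∧ u.getD (j - 1) ' ' = 'X' then 1 else 0) : Nat) + (if j + 1 < u.length ∧ u.getD (j + 1) ' ' = 'X' then 1 else 0)))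

lemma digitB_eq (u : List Char) (j : Nat) : digitB u j = [pvD u j] := by
  unfold digitB pvD
  split_ifs <;> rfl

-- all extensions of t by k characters from {' ', 'X'}, in A's (and B's) DFS order
def pvExt (t : List Char) : Nat → List (List Char)
  | 0 => [t]
  | k + 1 => pvExt (t ++ [' ']) k ++ pvExt (t ++ ['X']) k

lemma mem_pvExt {u t : List Char} {k : Nat} (h : u ∈ pvExt t k) :
    t <+: u ∧ u.length = t.length + k := by
  induction k generalizing t with
  | zero => simp [pvExt] at h; subst h; simp
  | succ k ih =>
    simp only [pvExt, List.mem_append] at h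
    rcases h with h | h
    · obtain ⟨⟨w, hw⟩, hl⟩ := ih h
      refine ⟨⟨[' '] ++ w, by simpa [List.append_assoc] using hw⟩, by simp at hl; omega⟩
    · obtain ⟨⟨w, hw⟩, hl⟩ := ih h
      refine ⟨⟨['X'] ++ w, by simpa [List.append_assoc] using hw⟩, by simp at hl; omega⟩

lemma enc_step (u : List Char) (k : Nat) (hk : k < u.length) :
    (let nr : Int := 0
     let nr := if in_range (u.length : Int) ((k:Int) - 1) && (PySem.List.pyGetD u ((k:Int) - 1) ' ' == 'X') then nr + 1 else nr
     let nr := if in_range (u.length : Int) ((k:Int) + 1) && (PySem.List.pyGetD u ((k:Int) + 1) ' ' == 'X') then nr + 1 else nr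
     PySem.Int.toChars nr) = [pvD u k] := by
  have e1 : (in_range (u.length : Int) ((k:Int) - 1) && (PySem.List.pyGetD u ((k:Int) - 1) ' ' == 'X')) = decide (0 < k ∧ u.getD (k - 1) ' ' = 'X') := by
    by_cases h0 : 0 < k
    · rw [show (k:Int) - 1 = ((k - 1 : Nat) : Int) from by omega, PySem.List.pyGetD_natCast]
      unfold in_range
      rw [decide_eq_decide.mpr (show ((0:Int) ≤ ((k-1:Nat):Int) ∧ ((k-1:Nat):Int) < (u.length:Int)) ↔ (0 < k) from by omega)]
      rw [show (u.getD (k-1) ' ' == 'X') = decide (u.getD (k-1) ' ' = 'X') from Bool.beq_eq_decide_eq _ _]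
      rw [← Bool.decide_and]
    · have hk0 : k = 0 := by omega
      subst hk0
      simp [in_range]
  have e2 : (in_range (u.length : Int) ((k:Int) + 1) && (PySem.List.pyGetD u ((k:Int) + 1) ' ' == 'X')) = decide (k + 1 < u.length ∧ u.getD (k + 1) ' ' = 'X') := by
    rw [show (k:Int) + 1 = ((k + 1 : Nat) : Int) from by omega, PySem.List.pyGetD_natCast]
    unfold in_range
    rw [decide_eq_decide.mpr (show ((0:Int) ≤ ((k+1:Nat):Int) ∧ ((k+1:Nat):Int) < (u.length:Int)) ↔ (k + 1 < u.length) from by omega)]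
    rw [show (u.getD (k+1) ' ' == 'X') = decide (u.getD (k+1) ' ' = 'X') from Bool.beq_eq_decide_eq _ _]
    rw [← Bool.decide_and]
  simp only [e1, e2, pvD, decide_eq_true_eq]
  split_ifs <;> rfl

lemma enc_map (u : List Char) : encode_chars u = (List.range u.length).map (pvD u) := by
  unfold encode_chars
  rw [PySem.List.pyRange_one]
  simp only [Int.sub_zero, Int.toNat_natCast, List.foldl_map, zero_add]
  rw [PySem.List.foldl_append_eq_flatMap _ (List.range u.length) []]
  rw [List.nil_append]
  exact Eq.trans (List.flatMap_congr (g := fun k => [pvD u k]) (fun k hk => enc_step u k (List.mem_range.mp hk))) (Eq.symm List.map_eq_flatMap)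

lemma enc_eq_iff (u scs : List Char) (hl : u.length = scs.length) :
    encode_chars u = scs ↔ ∀ j < u.length, scs.getD j ' ' = pvD u j := by
  rw [enc_map]
  constructor
  · intro h j hj
    rw [← h, List.getD_eq_getElem _ _ (by simpa using hj)]
    simp [hj]
  · intro h
    apply List.ext_getElem (by simp [hl])
    intro i h1 h2
    have hi : i < u.length := by simpa using h1
    have := h i hi
    rw [List.getD_eq_getElem _ _ h2] at this
    simp only [List.getElem_map, List.getElem_range]
    exact this.symm

lemma pvD_prefix (t w : List Char) (j : Nat) (h : j + 1 < t.length) :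
    pvD (t ++ w) j = pvD t j := by
  unfold pvD
  have h3 : j + 1 < t.length + w.length ↔ j + 1 < t.length := by omega
  simp only [List.getD_append _ _ _ _ (show j - 1 < t.length by omega),
    List.getD_append _ _ _ _ (show j + 1 < t.length by omega), List.length_append, h3]

lemma filter_nil_of_bad (scs t : List Char) (k j : Nat) (hj : j + 1 < t.length)
    (hbad : scs.getD j ' ' ≠ pvD t j) (hlen : t.length + k = scs.length) :
    (pvExt t k).filter (fun u => decide (encode_chars u = scs)) = [] := by
  apply List.filter_eq_nil_iff.mpr
  intro u hu
  obtain ⟨⟨w, hw⟩, hlu⟩ := mem_pvExt hu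
  simp only [decide_eq_true_eq]
  intro he
  have hul : u.length = scs.length := by omega
  have hpt := (enc_eq_iff u scs hul).mp he j (by omega)
  rw [← hw, pvD_prefix t w j hj] at hpt
  exact hbad hpt

lemma decode_go_eq (scs : List Char) (k : Nat) : ∀ (t : List Char) (output : List String),
    t.length + k = scs.length →
    decode_go scs (k + 1) t output =
      output ++ ((pvExt t k).filter (fun u => decide (encode_chars u = scs))).map String.ofList := by
  induction k with
  | zero =>
    intro t output h
    simp only [decode_go, pvExt]
    rw [if_pos (by omega)]
    by_cases he : encode_chars t = scs <;> simp [he]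
  | succ k ih =>
    intro t output h
    have hne : t.length ≠ scs.length := by omega
    conv_lhs => rw [decode_go]
    rw [if_neg hne]
    rw [ih (t ++ [' ']) output (by simp; omega), ih (t ++ ['X']) _ (by simp; omega)]
    simp [pvExt, List.filter_append, List.append_assoc]

lemma dfsB_eq (scs : List Char) (k : Nat) : ∀ (t : List Char) (output : List String),
    t.length + k = scs.length →
    (∀ j, j + 1 < t.length → scs.getD j ' ' = pvD t j) →
    dfsB scs k t output =
      output ++ ((pvExt t k).filter (fun u => decide (encode_chars u = scs))).map String.ofList := by
  induction k with
  | zero =>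
    intro t output hlen H
    have hl : t.length = scs.length := by omega
    simp only [dfsB, digitB_eq, List.cons.injEq, and_true]
    by_cases hc : scs.length = 0 ∨ scs.getD (scs.length - 1) ' ' = pvD t (t.length - 1)
    · have he : encode_chars t = scs := by
        refine (enc_eq_iff t scs hl).mpr (fun j hj => ?_)
        by_cases hj1 : j + 1 < t.length
        · exact H j hj1
        · have hj2 : j = t.length - 1 := by omega
          subst hj2
          rcases hc with h0 | hm
          · omega
          · simpa [hl] using hm
      rw [if_pos hc]
      simp [pvExt, he]
    · have hn0 : scs.length ≠ 0 := by tauto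
      have hm : scs.getD (scs.length - 1) ' ' ≠ pvD t (t.length - 1) := by tauto
      have he : encode_chars t ≠ scs := by
        intro he
        have he2 := (enc_eq_iff t scs hl).mp he (scs.length - 1) (by omega)
        exact hm (by simpa [hl] using he2)
      rw [if_neg hc]
      simp [pvExt, he]
  | succ k ih =>
    intro t output hlen H
    have hi : t.length < scs.length := by omega
    simp only [dfsB, digitB_eq, List.cons.injEq, and_true]
    have step : ∀ (c : Char) (acc : List String),
        (if t.length = 0 ∨ scs.getD (t.length - 1) ' ' = pvD (t ++ [c]) (t.length - 1) then
          dfsB scs k (t ++ [c]) acc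
        else acc) =
          acc ++ ((pvExt (t ++ [c]) k).filter (fun u => decide (encode_chars u = scs))).map String.ofList := by
      intro c acc
      by_cases hc : t.length = 0 ∨ scs.getD (t.length - 1) ' ' = pvD (t ++ [c]) (t.length - 1)
      · rw [if_pos hc]
        refine ih (t ++ [c]) acc (by simp; omega) (fun j hj => ?_)
        simp only [List.length_append, List.length_singleton] at hj
        by_cases hj1 : j + 1 < t.length
        · rw [pvD_prefix t [c] j hj1]
          exact H j hj1
        · have h0 : 0 < t.length := by omega
          have hj2 : j = t.length - 1 := by omega
          subst hj2
          rcases hc with h' | hm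
          · omega
          · exact hm
      · rw [if_neg hc]
        rw [not_or] at hc
        obtain ⟨h0, hm⟩ := hc
        rw [filter_nil_of_bad scs (t ++ [c]) k (t.length - 1)
          (by simp; omega) hm (by simp; omega)]
        simp
    rw [step ' ' output, step 'X' _]
    simp [pvExt, List.filter_append, List.append_assoc]

-- ===== VERDICT (by name: the statement is the Claim_ definition above) =====
theorem decode_helper_spec : Claim_equal_decode_helper := by
  intro s r output _ hPre
  unfold Pre_decode_helper at hPre
  unfold Spec_decode_helper decode_helper decode_helper_alt
  have hfuel : s.toList.length + 1 - r.toList.length = (s.toList.length - r.toList.length) + 1 := by omega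
  rw [hfuel, decode_go_eq s.toList (s.toList.length - r.toList.length) r.toList output (by omega)]
  rw [if_neg (by omega)]
  by_cases hall : (List.range (r.toList.length - 1)).all (fun j => decide ([s.toList.getD j ' '] = digitB r.toList j)) = true
  · rw [if_pos hall]
    refine (dfsB_eq s.toList (s.toList.length - r.toList.length) r.toList output (by omega) (fun j hj => ?_)).symm
    have := List.all_eq_true.mp hall j (List.mem_range.mpr (by omega))
    simpa [digitB_eq] using this
  · rw [if_neg hall]
    obtain ⟨j, hjm, hjbad⟩ := by
      simpa [List.all_eq_true] using hall
    rw [filter_nil_of_bad s.toList r.toList (s.toList.length - r.toList.length) j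
      (by simp at hjm ⊢; omega) (by simpa [digitB_eq] using hjbad) (by omega)]
    simp
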